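-- pv_equiv track=rewrite | github.com/Ayub-Hanif/Uninformed-Search | homework1_mhanifsaleh.py | solve_distinct_disks
-- ===== SOURCE A (Python) =====
-- import collections
--
-- def solve_distinct_disks(length, n):
--     first = tuple(range(n))
--     temp_finished = []
--     for i in range(n):
--         cell = length - 1 - i
--         temp_finished.append(cell)
--     finished = tuple(temp_finished)
--
--     #then I want to make sure we have the BFS
--     queue = collections.deque()
--     queue.append((first, []))
--     visited = {first}
--
--     while queue:
--         current, moves = queue.popleft()
--         if current == finished:
--             return moves
--         #I made this to check for membership.
--         taken = set(current)
--
--         #name the jumps to make it easier for coding logic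
--         jump_one_left = -1
--         jump_one_right = 1
--         jump_two_left = -2
--         jump_two_right = 2
--
--         #lets check for each disk and see if moving it can work.
--         for index in range(len(current)):
--             pos = current[index]
--             #checking for moving it to the left or right.
--             for i in (jump_two_right, jump_two_left, jump_one_right, jump_one_left):
--                 cell = pos + i
--                 #checking for conditions of the cell.
--                 if cell in taken:
--                     continue
--                 if not (0 <= cell < length):
--                     continue
--                 if abs(i) == jump_two_right:
--                     middle = (pos + cell) // 2
--                     if middle not in taken:
--                         continue
--
--                 #it is a valid move so we can add it to the queue.
--                 new_current = list(current)
--                 new_current[index] = cell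
--                 #sort the new current for right order.
--                 new_current = tuple(new_current)
--                 #checking for visited cells.
--                 if new_current not in visited:
--                     visited.add(new_current)
--                     #add the new current to the queue.
--                     queue.append((new_current, moves + [(pos, cell)]))
--     #return none since we can't find a solution.
--     return None
-- ===== SOURCE B (Python) =====
-- import collections
--
-- def solve_distinct_disks(length, n):
--     # Same BFS frontier, but the queue holds bare states; a parent map recorded at
--     # discovery time replaces the per-state carried move list, and the answer is
--     # reconstructed by backtracking from the finished state.
--     first = tuple(range(n))
--     finished = tuple(length - 1 - i for i in range(n))
--
--     queue = collections.deque([first])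
--     visited = {first}
--     parent = {}
--
--     while queue:
--         current = queue.popleft()
--         if current == finished:
--             moves = []
--             s = current
--             while s != first:
--                 s, move = parent[s]
--                 moves.append(move)
--             moves.reverse()
--             return moves
--         taken = set(current)
--         for index, pos in enumerate(current):
--             for d in (2, -2, 1, -1):
--                 cell = pos + d
--                 if cell in taken:
--                     continue
--                 if not (0 <= cell < length):
--                     continue
--                 if abs(d) == 2 and (pos + cell) // 2 not in taken:
--                     continue
--                 child = current[:index] + (cell,) + current[index + 1:]
--                 if child not in visited:
--                     visited.add(child)
--                     parent[child] = (current, (pos, cell))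
--                     queue.append(child)
--     return None
-- ===== Notes on version B (the rewrite author's own statement) =====
-- stated objective: alternative
-- what changed: The queue no longer carries a copied move list per state: B enqueues bare states, records parent[state] = (prev, move) at discovery time, and reconstructs the answer by backtracking from the finished state and reversing.
import Mathlib
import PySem

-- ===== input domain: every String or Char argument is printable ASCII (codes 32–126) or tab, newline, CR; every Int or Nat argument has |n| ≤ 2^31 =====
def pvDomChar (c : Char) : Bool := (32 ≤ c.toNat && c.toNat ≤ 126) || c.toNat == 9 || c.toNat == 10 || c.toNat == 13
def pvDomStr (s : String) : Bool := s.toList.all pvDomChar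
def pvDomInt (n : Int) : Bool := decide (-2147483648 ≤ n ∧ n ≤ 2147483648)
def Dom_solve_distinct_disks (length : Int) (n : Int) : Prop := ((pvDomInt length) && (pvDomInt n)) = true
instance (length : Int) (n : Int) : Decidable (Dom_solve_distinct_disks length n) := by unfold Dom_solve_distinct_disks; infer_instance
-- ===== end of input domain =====

-- B replaces A's per-state carried move lists by a parent map recorded at discovery time,
-- reconstructing the answer backwards from the finished state (alternative decomposition, same BFS order).

-- ===== PORT A =====
-- Python's 'taken = set(current)' is used ONLY for 'x in taken' membership tests; both ports
-- represent this ephemeral int set as a sorted array queried by binary search (exact as a set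
-- of ints), since a linear-scan list set is not evaluable on the large degenerate boards.
def pvSetOf (cur : List Int) : Array Int :=
  (cur.mergeSort (fun a b => decide (a ≤ b))).toArray

def pvSetMem (t : Array Int) (x : Int) : Bool :=
  (t.binSearch x (fun a b => decide (a < b))).isSome

-- fast exact binary exponentiation, used only to compute the BFS fuel bound cheaply
def pvPow (b e : Nat) : Nat :=
  if h : e = 0 then 1
  else
    let half := pvPow b (e / 2)
    if e % 2 = 0 then half * half else half * half * b
termination_by e
decreasing_by exact Nat.div_lt_self (Nat.pos_of_ne_zero h) (by decide)

-- A's inner loop body: try to move the disk at `index` (currently at `pos = current[index]`) by `d`.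
-- `taken = set(current)` is computed once per dequeued state and passed in.
def pvBodyA (length : Int) (taken : Array Int) (current : List Int) (moves : List (Int × Int))
    (acc : List (List Int × List (Int × Int)) × Std.HashSet (List Int)) (index : Int) (d : Int) :
    List (List Int × List (Int × Int)) × Std.HashSet (List Int) :=
  let pos := PySem.List.pyGetD current index 0
  let cell := pos + d
  if pvSetMem taken cell then acc
  else if ¬ (0 ≤ cell ∧ cell < length) then acc
  else if |d| = 2 ∧ ¬ pvSetMem taken (PySem.Int.floordiv (pos + cell) 2) then acc
  else
    let nc := current.set index.toNat cell
    if acc.2.contains nc then acc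
    else (acc.1 ++ [(nc, moves ++ [(pos, cell)])], acc.2.insert nc)

-- the two nested 'for' loops over disk indices and the jump tuple (+2, -2, +1, -1)
def pvExpandA (length : Int) (current : List Int) (moves : List (Int × Int))
    (acc : List (List Int × List (Int × Int)) × Std.HashSet (List Int)) :
    List (List Int × List (Int × Int)) × Std.HashSet (List Int) :=
  (PySem.List.pyRange 0 (PySem.List.len current) 1).foldl
    (fun acc index =>
      ([2, -2, 1, -1] : List Int).foldl
        (fun acc d => pvBodyA length (pvSetOf current) current moves acc index d) acc)
    acc

-- the 'while queue:' loop; `fuel` bounds the number of dequeues (each dequeue consumes one of the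
-- at most (length+n+1)^n ever-enqueued distinct states, so the fuel chosen below never runs out)
def pvBfsA (length : Int) (finished : List Int) :
    Nat → List (List Int × List (Int × Int)) → Std.HashSet (List Int) → Option (List (Int × Int))
  | 0, _, _ => none
  | _ + 1, [], _ => none
  | f + 1, (current, moves) :: rest, visited =>
    if current = finished then some moves
    else
      let acc := pvExpandA length current moves (rest, visited)
      pvBfsA length finished f acc.1 acc.2

def solve_distinct_disks (length : Int) (n : Int) : Option (List (Int × Int)) :=
  let first : List Int := PySem.List.pyRange 0 n 1
  -- the temp_finished append loop, as the equivalent comprehension over the same range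
  let finished : List Int := (PySem.List.pyRange 0 n 1).map (fun i => length - 1 - i)
  pvBfsA length finished (pvPow (length.toNat + n.toNat + 1) n.toNat + 1) [(first, [])] ((∅ : Std.HashSet (List Int)).insert first)

-- ===== PORT B =====
-- backtracking loop of B's reconstruction: collects moves from `s` back to `first`
-- (front of the result = last move); none = KeyError, which never occurs at runtime
def pvBack (first : List Int) (parent : PySem.Dict (List Int) (List Int × Int × Int)) :
    Nat → List Int → Option (List (Int × Int))
  | 0, _ => none
  | f + 1, s =>
    if s = first then some []
    else
      match parent.get? s with
      | none => none
      | some (p, mv) => (pvBack first parent f p).map (fun l => mv :: l)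

-- `moves.reverse()` then return; the fuel parent.size + 1 always suffices (chains visit distinct keys)
def pvReconstructB (first : List Int) (parent : PySem.Dict (List Int) (List Int × Int × Int))
    (s : List Int) : Option (List (Int × Int)) :=
  (pvBack first parent (parent.size + 1) s).map List.reverse

def pvBodyB (length : Int) (taken : Array Int) (current : List Int)
    (acc : List (List Int) × Std.HashSet (List Int) × PySem.Dict (List Int) (List Int × Int × Int))
    (ip : Int × Int) (d : Int) :
    List (List Int) × Std.HashSet (List Int) × PySem.Dict (List Int) (List Int × Int × Int) :=
  let pos := ip.2
  let cell := pos + d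
  if pvSetMem taken cell then acc
  else if ¬ (0 ≤ cell ∧ cell < length) then acc
  else if |d| = 2 ∧ ¬ pvSetMem taken (PySem.Int.floordiv (pos + cell) 2) then acc
  else
    let child := current.take ip.1.toNat ++ [cell] ++ current.drop (ip.1.toNat + 1)
    if acc.2.1.contains child then acc
    else (acc.1 ++ [child], acc.2.1.insert child, acc.2.2.insert child (current, pos, cell))

def pvExpandB (length : Int) (current : List Int)
    (acc : List (List Int) × Std.HashSet (List Int) × PySem.Dict (List Int) (List Int × Int × Int)) :
    List (List Int) × Std.HashSet (List Int) × PySem.Dict (List Int) (List Int × Int × Int) :=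
  (PySem.List.enumerate current).foldl
    (fun acc ip =>
      ([2, -2, 1, -1] : List Int).foldl
        (fun acc d => pvBodyB length (pvSetOf current) current acc ip d) acc)
    acc

def pvBfsB (length : Int) (finished : List Int) (first : List Int) :
    Nat → List (List Int) → Std.HashSet (List Int) → PySem.Dict (List Int) (List Int × Int × Int) →
    Option (List (Int × Int))
  | 0, _, _, _ => none
  | _ + 1, [], _, _ => none
  | f + 1, current :: rest, visited, parent =>
    if current = finished then pvReconstructB first parent current
    else
      let acc := pvExpandB length current (rest, visited, parent)
      pvBfsB length finished first f acc.1 acc.2.1 acc.2.2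

def solve_distinct_disks_alt (length : Int) (n : Int) : Option (List (Int × Int)) :=
  let first : List Int := PySem.List.pyRange 0 n 1
  let finished : List Int := (PySem.List.pyRange 0 n 1).map (fun i => length - 1 - i)
  pvBfsB length finished first (pvPow (length.toNat + n.toNat + 1) n.toNat + 1) [first]
    ((∅ : Std.HashSet (List Int)).insert first) PySem.Dict.empty

-- ===== PRECONDITION & SPEC =====
def Spec_solve_distinct_disks (length : Int) (n : Int) (out : Option (List (Int × Int))) : Prop := out = solve_distinct_disks_alt length n
instance (length : Int) (n : Int) (out : Option (List (Int × Int))) : Decidable (Spec_solve_distinct_disks length n out) := by unfold Spec_solve_distinct_disks; infer_instance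

-- ===== CLAIM (what is proved, stated in full; the proofs are below) =====
def Claim_equal_solve_distinct_disks : Prop := ∀ (length : Int) (n : Int), Dom_solve_distinct_disks length n → Spec_solve_distinct_disks length n (solve_distinct_disks length n)

-- ===== LEMMAS AND PROOFS =====

-- the queues of the two BFS loops are aligned: same states, and backtracking the
-- parent map reproduces exactly the move list A carries (reversed)
def pvGoodQ (first : List Int) (parent : PySem.Dict (List Int) (List Int × Int × Int))
    (qa : List (List Int × List (Int × Int))) (qb : List (List Int)) : Prop :=
  List.Forall₂
    (fun pm s => pm.1 = s ∧ pvBack first parent (parent.size + 1) s = some pm.2.reverse) qa qb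

lemma pvBack_mono (first : List Int) (parent : PySem.Dict (List Int) (List Int × Int × Int)) :
    ∀ (f : Nat) (s : List Int) (m : List (Int × Int)),
      pvBack first parent f s = some m → pvBack first parent (f + 1) s = some m := by
  intro f
  induction f with
  | zero => intro s m h; simp [pvBack] at h
  | succ f ih =>
    intro s m h
    rw [pvBack] at h ⊢
    by_cases hs : s = first
    · simpa [hs] using h
    · simp only [hs, if_false] at h ⊢
      cases hg : parent.get? s with
      | none => simp [hg] at h
      | some pw =>
        obtain ⟨p, mv⟩ := pw
        simp only [hg] at h ⊢
        obtain ⟨m', hm', rfl⟩ := Option.map_eq_some_iff.mp h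
        simp [ih p m' hm']

lemma pvBack_insert_fresh (first : List Int) (parent : PySem.Dict (List Int) (List Int × Int × Int))
    (c : List Int) (w : List Int × Int × Int) (hk : parent.get? c = none) :
    ∀ (f : Nat) (s : List Int) (m : List (Int × Int)),
      pvBack first parent f s = some m → pvBack first (parent.insert c w) f s = some m := by
  intro f
  induction f with
  | zero => intro s m h; simp [pvBack] at h
  | succ f ih =>
    intro s m h
    rw [pvBack] at h ⊢
    by_cases hs : s = first
    · simpa [hs] using h
    · simp only [hs, if_false] at h ⊢
      cases hg : parent.get? s with
      | none => simp [hg] at h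
      | some pw =>
        obtain ⟨p, mv⟩ := pw
        have hsc : s ≠ c := fun he => by rw [he, hk] at hg; cases hg
        rw [PySem.Dict.get?_insert_of_ne _ _ hsc]
        simp only [hg] at h ⊢
        obtain ⟨m', hm', rfl⟩ := Option.map_eq_some_iff.mp h
        simp [ih p m' hm']

-- full relation between the two accumulators while expanding one dequeued state
def pvAccRel (first cur : List Int) (moves : List (Int × Int))
    (a : List (List Int × List (Int × Int)) × Std.HashSet (List Int))
    (b : List (List Int) × Std.HashSet (List Int) × PySem.Dict (List Int) (List Int × Int × Int)) :
    Prop :=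
  a.2 = b.2.1 ∧
  pvGoodQ first b.2.2 a.1 b.1 ∧
  pvBack first b.2.2 (b.2.2.size + 1) cur = some moves.reverse ∧
  first ∈ a.2 ∧ cur ∈ a.2 ∧ (∀ s ∈ b.1, s ∈ a.2) ∧
  (∀ k w, b.2.2.get? k = some w → k ∈ a.2)

lemma pvFoldl_rel {ι α β : Type} (l : List ι) (f : α → ι → α) (g : β → ι → β)
    (R : α → β → Prop) (h : ∀ i ∈ l, ∀ a b, R a b → R (f a i) (g b i)) :
    ∀ a b, R a b → R (l.foldl f a) (l.foldl g b) := by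
  induction l with
  | nil => intro a b hR; exact hR
  | cons x xs ih =>
    intro a b hR
    exact ih (fun i hi => h i (List.mem_cons_of_mem x hi)) _ _ (h x List.mem_cons_self a b hR)

lemma pvForall₂_append {α β : Type} {R : α → β → Prop} {l1 l3 : List α} {l2 l4 : List β}
    (h : List.Forall₂ R l1 l2) (h2 : List.Forall₂ R l3 l4) :
    List.Forall₂ R (l1 ++ l3) (l2 ++ l4) := by
  induction h with
  | nil => simpa
  | cons hx ht ih => simpa using List.Forall₂.cons hx ih

lemma pvBody_rel (lng : Int) (first cur : List Int) (moves : List (Int × Int))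
    (idx : Int) (d : Int) (hidx : idx.toNat < cur.length) (a b)
    (hR : pvAccRel first cur moves a b) :
    pvAccRel first cur moves
      (pvBodyA lng (pvSetOf cur) cur moves a idx d)
      (pvBodyB lng (pvSetOf cur) cur b (idx, PySem.List.pyGetD cur idx 0) d) := by
  obtain ⟨qa, va⟩ := a
  obtain ⟨qb, vb, par⟩ := b
  have hv : va = vb := hR.1
  subst hv
  have hset : cur.take idx.toNat ++ [PySem.List.pyGetD cur idx 0 + d] ++ cur.drop (idx.toNat + 1)
      = cur.set idx.toNat (PySem.List.pyGetD cur idx 0 + d) := by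
    rw [List.set_eq_take_append_cons_drop]
    simp [hidx]
  set nc := cur.set idx.toNat (PySem.List.pyGetD cur idx 0 + d) with hncdef
  set w : List Int × Int × Int :=
    (cur, PySem.List.pyGetD cur idx 0, PySem.List.pyGetD cur idx 0 + d) with hwdef
  have hbodyA : pvBodyA lng (pvSetOf cur) cur moves (qa, va) idx d
      = if pvSetMem (pvSetOf cur) (PySem.List.pyGetD cur idx 0 + d) = true then (qa, va)
        else if ¬ (0 ≤ PySem.List.pyGetD cur idx 0 + d ∧ PySem.List.pyGetD cur idx 0 + d < lng) then (qa, va)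
        else if (|d| = 2 ∧ ¬ pvSetMem (pvSetOf cur)
            (PySem.Int.floordiv (PySem.List.pyGetD cur idx 0 + (PySem.List.pyGetD cur idx 0 + d)) 2) = true) then (qa, va)
        else if va.contains nc = true then (qa, va)
        else (qa ++ [(nc, moves ++ [(PySem.List.pyGetD cur idx 0, PySem.List.pyGetD cur idx 0 + d)])],
              va.insert nc) := by
    simp only [pvBodyA]
    rw [hncdef]
  have hbodyB : pvBodyB lng (pvSetOf cur) cur (qb, va, par)
        (idx, PySem.List.pyGetD cur idx 0) d
      = if pvSetMem (pvSetOf cur) (PySem.List.pyGetD cur idx 0 + d) = true then (qb, va, par)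
        else if ¬ (0 ≤ PySem.List.pyGetD cur idx 0 + d ∧ PySem.List.pyGetD cur idx 0 + d < lng) then (qb, va, par)
        else if (|d| = 2 ∧ ¬ pvSetMem (pvSetOf cur)
            (PySem.Int.floordiv (PySem.List.pyGetD cur idx 0 + (PySem.List.pyGetD cur idx 0 + d)) 2) = true) then (qb, va, par)
        else if va.contains nc = true then (qb, va, par)
        else (qb ++ [nc], va.insert nc, par.insert nc w) := by
    simp only [pvBodyB]
    rw [hset, hncdef, hwdef]
  rw [hbodyA, hbodyB]
  by_cases h1 : pvSetMem (pvSetOf cur) (PySem.List.pyGetD cur idx 0 + d) = true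
  · rw [if_pos h1, if_pos h1]; exact hR
  rw [if_neg h1, if_neg h1]
  by_cases h2 : ¬ (0 ≤ PySem.List.pyGetD cur idx 0 + d ∧ PySem.List.pyGetD cur idx 0 + d < lng)
  · rw [if_pos h2, if_pos h2]; exact hR
  rw [if_neg h2, if_neg h2]
  by_cases h3 : (|d| = 2 ∧ ¬ pvSetMem (pvSetOf cur)
      (PySem.Int.floordiv (PySem.List.pyGetD cur idx 0 + (PySem.List.pyGetD cur idx 0 + d)) 2) = true)
  · rw [if_pos h3, if_pos h3]; exact hR
  rw [if_neg h3, if_neg h3]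
  by_cases h4 : va.contains nc = true
  · rw [if_pos h4, if_pos h4]; exact hR
  rw [if_neg h4, if_neg h4]
  obtain ⟨-, hq, hcur, hfv, hcv, hqb, hkeys⟩ := hR
  simp only at hq hcur hfv hcv hqb hkeys
  have hmem : nc ∉ va := fun hm => h4 (Std.HashSet.mem_iff_contains.mp hm)
  have hfresh : par.get? nc = none := by
    cases hg : par.get? nc with
    | none => rfl
    | some w' => exact absurd (hkeys nc w' hg) hmem
  have hncf : nc ≠ first := fun he => hmem (he ▸ hfv)
  have hsize : (par.insert nc w).size = par.size + 1 := by
    rw [PySem.Dict.size_insert, PySem.Dict.contains_eq_isSome_get?, hfresh]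
    rfl
  have hlift : ∀ (s : List Int) (m : List (Int × Int)),
      pvBack first par (par.size + 1) s = some m →
      pvBack first (par.insert nc w) ((par.insert nc w).size + 1) s = some m := by
    intro s m hm
    rw [hsize]
    exact pvBack_mono _ _ _ _ _ (pvBack_insert_fresh _ _ _ _ hfresh _ _ _ hm)
  refine ⟨rfl, ?_, hlift _ _ hcur, ?_, ?_, ?_, ?_⟩
  · refine pvForall₂_append (hq.imp ?_) ?_
    · rintro pm s ⟨h5, h6⟩
      exact ⟨h5, hlift _ _ h6⟩
    · refine List.Forall₂.cons ⟨rfl, ?_⟩ List.Forall₂.nil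
      rw [hsize, pvBack]
      rw [if_neg hncf, PySem.Dict.get?_insert_self]
      rw [hwdef]
      dsimp only
      rw [show pvBack first (par.insert nc (cur, PySem.List.pyGetD cur idx 0,
            PySem.List.pyGetD cur idx 0 + d)) (par.size + 1) cur = some moves.reverse from
          pvBack_insert_fresh first par nc _ hfresh (par.size + 1) cur moves.reverse hcur]
      simp
  · exact Std.HashSet.mem_insert.mpr (Or.inr hfv)
  · exact Std.HashSet.mem_insert.mpr (Or.inr hcv)
  · intro s hs
    rcases List.mem_append.mp hs with hs | hs
    · exact Std.HashSet.mem_insert.mpr (Or.inr (hqb s hs))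
    · simp only [List.mem_singleton] at hs
      exact Std.HashSet.mem_insert.mpr (Or.inl (by simp [hs]))
  · intro k w' hk
    by_cases hkn : k = nc
    · exact Std.HashSet.mem_insert.mpr (Or.inl (by simp [hkn]))
    · rw [PySem.Dict.get?_insert_of_ne _ _ hkn] at hk
      exact Std.HashSet.mem_insert.mpr (Or.inr (hkeys k w' hk))

lemma pvExpand_rel (lng : Int) (first cur : List Int) (moves : List (Int × Int)) (a b)
    (hR : pvAccRel first cur moves a b) :
    pvAccRel first cur moves (pvExpandA lng cur moves a) (pvExpandB lng cur b) := by
  unfold pvExpandA pvExpandB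
  rw [PySem.List.enumerate_eq_map_pyRange cur 0, List.foldl_map]
  refine pvFoldl_rel _ _ _ _ ?_ _ _ hR
  intro idx hmem a b hR
  rw [PySem.List.mem_pyRange_one, PySem.List.len_eq] at hmem
  have hidx : idx.toNat < cur.length := by omega
  refine pvFoldl_rel _ _ _ _ ?_ _ _ hR
  intro d _ a b hR
  exact pvBody_rel lng first cur moves idx d hidx a b hR

lemma pvBfs_rel (lng : Int) (finished first : List Int) :
    ∀ (f : Nat) (qa : List (List Int × List (Int × Int))) (qb : List (List Int))
      (v : Std.HashSet (List Int)) (parent : PySem.Dict (List Int) (List Int × Int × Int)),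
      pvGoodQ first parent qa qb → first ∈ v → (∀ s ∈ qb, s ∈ v) →
      (∀ k w, parent.get? k = some w → k ∈ v) →
      pvBfsA lng finished f qa v = pvBfsB lng finished first f qb v parent := by
  intro f
  induction f with
  | zero => intro qa qb v parent _ _ _ _; rw [pvBfsA, pvBfsB]
  | succ f ih =>
    intro qa qb v parent hq hfv hqb hkeys
    cases hq with
    | nil => rw [pvBfsA, pvBfsB]
    | cons hh ht =>
      rename_i pm s resta restb
      obtain ⟨cur, mv⟩ := pm
      obtain ⟨hh1, hh2⟩ := hh
      simp only at hh1 hh2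
      subst hh1
      rw [pvBfsA, pvBfsB]
      by_cases hfin : cur = finished
      · rw [if_pos hfin, if_pos hfin]
        unfold pvReconstructB
        rw [hh2]
        simp
      · rw [if_neg hfin, if_neg hfin]
        have hrel : pvAccRel first cur mv (resta, v) (restb, v, parent) :=
          ⟨rfl, ht, hh2, hfv, hqb cur List.mem_cons_self,
            fun s hs => hqb s (List.mem_cons_of_mem _ hs), hkeys⟩
        have hout := pvExpand_rel lng first cur mv _ _ hrel
        obtain ⟨ho1, ho2, -, ho4, -, ho6, ho7⟩ := hout
        rw [ih _ _ _ _ ho2 (ho1 ▸ ho4) (fun s hs => ho1 ▸ ho6 s hs)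
          (fun k w hk => ho1 ▸ ho7 k w hk)]
        rw [ho1]

-- ===== VERDICT (by name: the statement is the Claim_ definition above) =====
theorem solve_distinct_disks_spec : Claim_equal_solve_distinct_disks := by
  intro lng n _
  unfold Spec_solve_distinct_disks solve_distinct_disks solve_distinct_disks_alt
  apply pvBfs_rel
  · exact List.Forall₂.cons ⟨rfl, by simp [pvBack]⟩ List.Forall₂.nil
  · simp [Std.HashSet.mem_insert]
  · intro s hs; simp only [List.mem_singleton] at hs; simp [hs, Std.HashSet.mem_insert]
  · intro k w hk; simp [PySem.Dict.get?_empty] at hk
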